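-- pv_equiv track=rewrite | github.com/pith-ui/pith-ui | scripts/e2e_priority.py | transitive_dependants
-- ===== SOURCE A (Python) =====
-- def transitive_dependants(
--     node: str,
--     reverse_graph: dict[str, set[str]],
--     depth: int = 0,
--     visited: set[str] | None = None,
-- ) -> list[tuple[str, int]]:
--     """Return list of (dependant, depth) pairs reachable from node."""
--     if visited is None:
--         visited = set()
--     result: list[tuple[str, int]] = []
--     for dep in reverse_graph.get(node, set()):
--         if dep not in visited:
--             visited.add(dep)
--             result.append((dep, depth + 1))
--             result.extend(
--                 transitive_dependants(dep, reverse_graph, depth + 1, visited)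
--             )
--     return result
-- ===== SOURCE B (Python) =====
-- def transitive_dependants(
--     node,
--     reverse_graph,
--     depth=0,
--     visited=None,
-- ):
--     """Return list of (dependant, depth) pairs reachable from node.
--
--     Iterative DFS with an explicit stack of (iterator, depth) frames
--     instead of recursion.  Mutates `visited` (when given) exactly like
--     the recursive version: each emitted node is added at append time.
--     """
--     if visited is None:
--         visited = set()
--     result = []
--     stack = [(iter(list(reverse_graph.get(node, set()))), depth)]
--     while stack:
--         it, d = stack[-1]
--         for child in it:
--             if child not in visited:
--                 visited.add(child)
--                 result.append((child, d + 1))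
--                 stack.append((iter(list(reverse_graph.get(child, set()))), d + 1))
--                 break
--         else:
--             stack.pop()
--     return result
-- ===== Notes on version B (the rewrite author's own statement) =====
-- stated objective: alternative
-- what changed: Replaces A's recursive DFS (one call frame per visited node, result lists concatenated up the call tree) by an iterative DFS over an explicit stack of (iterator, depth) frames appending to a single result list; visited is marked at append time exactly as in A.
import Mathlib
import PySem

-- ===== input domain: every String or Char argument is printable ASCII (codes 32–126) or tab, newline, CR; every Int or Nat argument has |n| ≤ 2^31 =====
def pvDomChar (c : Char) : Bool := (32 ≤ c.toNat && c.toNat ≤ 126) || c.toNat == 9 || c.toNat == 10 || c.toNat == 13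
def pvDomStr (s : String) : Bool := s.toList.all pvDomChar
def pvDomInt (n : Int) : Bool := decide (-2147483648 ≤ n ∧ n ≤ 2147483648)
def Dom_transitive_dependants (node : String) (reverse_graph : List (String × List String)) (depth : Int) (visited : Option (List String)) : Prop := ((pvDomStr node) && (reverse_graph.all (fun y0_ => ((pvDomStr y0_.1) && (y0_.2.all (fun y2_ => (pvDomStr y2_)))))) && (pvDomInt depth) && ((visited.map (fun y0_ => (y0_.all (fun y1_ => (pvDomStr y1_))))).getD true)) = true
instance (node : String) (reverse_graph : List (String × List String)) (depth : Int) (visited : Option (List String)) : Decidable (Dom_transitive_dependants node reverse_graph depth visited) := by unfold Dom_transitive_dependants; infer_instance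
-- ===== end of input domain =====

-- B replaces A's recursive DFS by an iterative DFS over an explicit stack of
-- (remaining-children, depth) frames (objective: alternative decomposition, same cost).
-- Both Pythons mutate the caller's `visited` set identically; the equivalence proved
-- here is about the RETURN value.

-- ===== PORT A =====

-- reverse_graph.get(n, set()) as a list of the set's distinct elements
def pvLookup (rg : List (String × List String)) (k : String) : List String :=
  (PySem.Dict.mk rg).getD k []

-- all strings occurring in the graph's value sets (termination measure support)
def pvAllDeps (rg : List (String × List String)) : List String :=
  (rg.map Prod.snd).flatten

-- number of graph-value strings not yet visited (termination measure)
def pvMeas (rg : List (String × List String)) (visited : List String) : Nat :=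
  ((pvAllDeps rg).filter (fun x => decide (x ∉ visited))).length

theorem pvLookup_subset (rg : List (String × List String)) (k : String) :
    ∀ x ∈ pvLookup rg k, x ∈ pvAllDeps rg := by
  induction rg with
  | nil => simp [pvLookup, PySem.Dict.getD, PySem.Dict.get?]
  | cons p rest ih =>
    obtain ⟨k0, v0⟩ := p
    intro x hx
    simp only [pvLookup, PySem.Dict.getD_eq_get?_getD, PySem.Dict.get?_mk_cons] at hx
    simp only [pvAllDeps, List.map_cons, List.flatten_cons, List.mem_append]
    by_cases h : (k0 == k) = true
    · simp [h] at hx; exact Or.inl hx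
    · simp only [h, Bool.false_eq_true, if_false] at hx
      exact Or.inr (ih x (by simpa [pvLookup, PySem.Dict.getD_eq_get?_getD] using hx))

theorem pvMeas_mono (rg : List (String × List String)) {v w : List String}
    (h : ∀ x ∈ v, x ∈ w) : pvMeas rg w ≤ pvMeas rg v := by
  exact List.Sublist.length_le (List.monotone_filter_right _ (by
    intro a ha
    simp only [decide_eq_true_eq] at *
    exact fun hv => ha (h a hv)))

theorem pvMeas_strict (rg : List (String × List String)) {v : List String} {dep : String}
    (hall : dep ∈ pvAllDeps rg) (hnv : dep ∉ v) :
    pvMeas rg (v ++ [dep]) < pvMeas rg v := by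
  have hsub : ((pvAllDeps rg).filter (fun x => decide (x ∉ v ++ [dep]))).Sublist
      ((pvAllDeps rg).filter (fun x => decide (x ∉ v))) := by
    refine List.monotone_filter_right _ ?_
    intro a ha
    simp only [decide_eq_true_eq, List.mem_append] at *
    exact fun hv => ha (Or.inl hv)
  refine lt_of_le_of_ne (List.Sublist.length_le hsub) ?_
  intro hlen
  have heq := hsub.eq_of_length hlen
  have h1 : dep ∈ (pvAllDeps rg).filter (fun x => decide (x ∉ v)) := by
    simp [hall, hnv]
  rw [← heq] at h1
  simp at h1

-- the recursive DFS of A, looping over a children list; the subtype result records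
-- that `visited` only grows (needed for the termination measure of the sibling call)
def pvGoA (rg : List (String × List String)) :
    (l : List String) → (hl : ∀ x ∈ l, x ∈ pvAllDeps rg) → (depth : Int) →
    (visited : List String) →
    {p : List (String × Int) × List String // ∀ x ∈ visited, x ∈ p.2}
  | [], _, _, visited => ⟨([], visited), fun _ h => h⟩
  | dep :: rest, hl, depth, visited =>
    if hmem : dep ∈ visited then
      pvGoA rg rest (fun x hx => hl x (List.mem_cons_of_mem _ hx)) depth visited
    else
      let child := pvGoA rg (pvLookup rg dep) (pvLookup_subset rg dep) (depth + 1)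
        (visited ++ [dep])
      let tail := pvGoA rg rest (fun x hx => hl x (List.mem_cons_of_mem _ hx)) depth
        child.1.2
      ⟨((dep, depth + 1) :: (child.1.1 ++ tail.1.1), tail.1.2),
       fun x hx => tail.2 x (child.2 x (List.mem_append_left _ hx))⟩
  termination_by l _ _ visited => (pvMeas rg visited, l.length)
  decreasing_by
  · exact Prod.Lex.right _ (by simp)
  · exact Prod.Lex.left _ _ (pvMeas_strict rg (hl dep List.mem_cons_self) hmem)
  · have h1 : pvMeas rg child.1.2 ≤ pvMeas rg (visited ++ [dep]) :=
      pvMeas_mono rg child.2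
    have h2 : pvMeas rg (visited ++ [dep]) < pvMeas rg visited :=
      pvMeas_strict rg (hl dep List.mem_cons_self) hmem
    exact Prod.Lex.left _ _ (lt_of_le_of_lt h1 h2)

def transitive_dependants (node : String) (reverse_graph : List (String × List String))
    (depth : Int) (visited : Option (List String)) : List (String × Int) :=
  (pvGoA reverse_graph (pvLookup reverse_graph node) (pvLookup_subset reverse_graph node)
    depth (visited.getD [])).1.1

-- ===== PORT B =====

-- the while loop of B: stack of (remaining children, depth) frames, head = top
def pvGoB (rg : List (String × List String)) :
    (stack : List (List String × Int)) →
    (hs : ∀ f ∈ stack, ∀ x ∈ f.1, x ∈ pvAllDeps rg) →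
    (visited : List String) → (result : List (String × Int)) → List (String × Int)
  | [], _, _, result => result
  | ([], _) :: stk, hs, visited, result =>
      -- frame exhausted: pop
      pvGoB rg stk (fun f hf => hs f (List.mem_cons_of_mem _ hf)) visited result
  | (c :: cs, d) :: stk, hs, visited, result =>
      if hmem : c ∈ visited then
        -- already visited: advance the frame's iterator
        pvGoB rg ((cs, d) :: stk)
          (fun f hf => by
            rcases List.mem_cons.mp hf with rfl | hf
            · exact fun x hx => hs ((c :: cs, d)) List.mem_cons_self x
                (List.mem_cons_of_mem _ hx)
            · exact hs f (List.mem_cons_of_mem _ hf))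
          visited result
      else
        -- new node: mark, emit, push its frame
        pvGoB rg ((pvLookup rg c, d + 1) :: (cs, d) :: stk)
          (fun f hf => by
            rcases List.mem_cons.mp hf with rfl | hf
            · exact pvLookup_subset rg c
            · rcases List.mem_cons.mp hf with rfl | hf
              · exact fun x hx => hs ((c :: cs, d)) List.mem_cons_self x
                  (List.mem_cons_of_mem _ hx)
              · exact hs f (List.mem_cons_of_mem _ hf))
          (visited ++ [c]) (result ++ [(c, d + 1)])
  termination_by stack _ visited _ =>
    (pvMeas rg visited, (stack.map (fun f => f.1.length)).sum + stack.length)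
  decreasing_by
  · exact Prod.Lex.right _ (by simp)
  · exact Prod.Lex.right _ (by simp)
  · exact Prod.Lex.left _ _
      (pvMeas_strict rg (hs (c :: cs, d) List.mem_cons_self c List.mem_cons_self) hmem)

def transitive_dependants_alt (node : String) (reverse_graph : List (String × List String))
    (depth : Int) (visited : Option (List String)) : List (String × Int) :=
  pvGoB reverse_graph [(pvLookup reverse_graph node, depth)]
    (fun f hf => by
      rcases List.mem_cons.mp hf with rfl | hf
      · exact pvLookup_subset reverse_graph node
      · simp at hf)
    (visited.getD []) []

-- ===== PRECONDITION & SPEC =====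
def Spec_transitive_dependants (node : String) (reverse_graph : List (String × List String)) (depth : Int) (visited : Option (List String)) (out : List (String × Int)) : Prop := out = transitive_dependants_alt node reverse_graph depth visited
instance (node : String) (reverse_graph : List (String × List String)) (depth : Int) (visited : Option (List String)) (out : List (String × Int)) : Decidable (Spec_transitive_dependants node reverse_graph depth visited out) := by unfold Spec_transitive_dependants; infer_instance

-- ===== CLAIM (what is proved, stated in full; the proofs are below) =====
def Claim_equal_transitive_dependants : Prop := ∀ (node : String) (reverse_graph : List (String × List String)) (depth : Int) (visited : Option (List String)), Dom_transitive_dependants node reverse_graph depth visited → Spec_transitive_dependants node reverse_graph depth visited (transitive_dependants node reverse_graph depth visited)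

-- ===== LEMMAS AND PROOFS =====

-- running B's loop with frame (l, d) on top equals running A's recursion on l first,
-- then continuing B's loop on the rest of the stack with the grown visited set
theorem pvGoB_frame (rg : List (String × List String)) :
    ∀ (l : List String) (hl : ∀ x ∈ l, x ∈ pvAllDeps rg) (d : Int) (v : List String)
      (stk : List (List String × Int)) (hs hs') (res : List (String × Int)),
      pvGoB rg ((l, d) :: stk) hs v res =
        pvGoB rg stk hs' (pvGoA rg l hl d v).1.2 (res ++ (pvGoA rg l hl d v).1.1) := by
  intro l hl d v
  induction l, hl, d, v using pvGoA.induct rg with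
  | case1 d _ v _ =>
    intro stk hs hs' res
    simp [pvGoA, pvGoB]
  | case2 dep rest hl d v hmem _ ih =>
    intro stk hs hs' res
    rw [pvGoB]
    simp only [hmem, dite_true]
    rw [ih _ _ hs', pvGoA]
    simp only [hmem, reduceDIte]
  | case3 dep rest hl d v hmem child hall ihc ihT ihB =>
    intro stk hs hs' res
    rw [pvGoB]
    simp only [hmem, reduceDIte]
    rw [ihc ((rest, d) :: stk) _ (fun f hf => by
      rcases List.mem_cons.mp hf with rfl | hf
      · exact fun x hx => hl x (List.mem_cons_of_mem _ hx)
      · exact hs' f hf)]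
    rw [ihB stk _ hs']
    rw [pvGoA]
    simp only [hmem, reduceDIte]
    simp

theorem transitive_dependants_spec : Claim_equal_transitive_dependants := by
  intro node rg depth visited _
  unfold Spec_transitive_dependants transitive_dependants transitive_dependants_alt
  rw [pvGoB_frame rg (pvLookup rg node) (pvLookup_subset rg node) depth (visited.getD [])
    [] _ (fun f hf => by simp at hf) []]
  simp [pvGoB]
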